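-- pv_equiv track=rewrite | github.com/nrr138/GigaCow | Cow_Network_All_D.py | Calc_Network
-- ===== SOURCE A (Python) =====
-- import itertools
--
-- def cow_groups(lst):
--     combs = []
--     for r in range(len(lst)+1):
--         for comb in itertools.combinations(set(lst), r):
--             if len(comb) == 2:
--                 combs.append(tuple(sorted(comb)))
--     return combs
--
-- def Calc_Network(start_time, kor, time):
--     hold=[]
--     cow_dict={}
--
--     for i in range(len(kor)-1):
--
--         hold.append(int(kor[i]))
--         if not abs((start_time[i]-start_time[i+1])) <= time or len(hold) > 4:
--             if len(hold) > 1: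
--                 h = cow_groups(hold)
--
--                 for group in h:
--
--                     if group not in cow_dict:
--                         cow_dict[group]=1
--                     else:
--                         cow_dict[group]+=1
--             hold=[]
--
--     return cow_dict
-- ===== SOURCE B (Python) =====
-- import itertools
--
-- def Calc_Network(start_time, kor, time):
--     # Arithmetic segmentation instead of simulating the flush buffer: record cut
--     # positions at big time gaps, slice the id prefix into runs, chop each run into
--     # stride-5 chunks; the trailing partial chunk of the final run is never flushed
--     # by the original loop, so it is skipped.
--     n = len(kor)
--     m = n - 1 if n > 0 else 0
--     ids = [int(k) for k in kor[:m]]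
--     prev = 0
--     runs = []
--     for i in range(n - 1):
--         if abs(start_time[i] - start_time[i + 1]) > time:
--             runs.append(ids[prev:i + 1])
--             prev = i + 1
--     runs.append(ids[prev:m])
--     cow_dict = {}
--     for r, run in enumerate(runs):
--         is_last = (r == len(runs) - 1)
--         for j in range(0, len(run), 5):
--             chunk = run[j:j + 5]
--             if is_last and len(chunk) < 5:
--                 continue
--             for a, b in itertools.combinations(set(chunk), 2):
--                 key = (a, b) if a < b else (b, a)
--                 cow_dict[key] = cow_dict.get(key, 0) + 1
--     return cow_dict
-- ===== Notes on version B (the rewrite author's own statement) =====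
-- stated objective: faster
-- what changed: B never simulates A's flush buffer or enumerates subsets: it computes cut positions arithmetically (one per big time gap), slices the id prefix into runs, chops each run into stride-5 chunks (skipping the final run's never-flushed partial chunk), and counts each chunk's unordered id pairs via combinations(set,2) with dict.get; the constant-factor win comes from generating only size-2 combinations instead of all 2^w subsets per window and from not copying values through a buffer.
-- outside the precondition, e.g. on Calc_Network([0], [1, 2, 3], 5): A raises IndexError, B raises IndexError
import Mathlib
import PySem

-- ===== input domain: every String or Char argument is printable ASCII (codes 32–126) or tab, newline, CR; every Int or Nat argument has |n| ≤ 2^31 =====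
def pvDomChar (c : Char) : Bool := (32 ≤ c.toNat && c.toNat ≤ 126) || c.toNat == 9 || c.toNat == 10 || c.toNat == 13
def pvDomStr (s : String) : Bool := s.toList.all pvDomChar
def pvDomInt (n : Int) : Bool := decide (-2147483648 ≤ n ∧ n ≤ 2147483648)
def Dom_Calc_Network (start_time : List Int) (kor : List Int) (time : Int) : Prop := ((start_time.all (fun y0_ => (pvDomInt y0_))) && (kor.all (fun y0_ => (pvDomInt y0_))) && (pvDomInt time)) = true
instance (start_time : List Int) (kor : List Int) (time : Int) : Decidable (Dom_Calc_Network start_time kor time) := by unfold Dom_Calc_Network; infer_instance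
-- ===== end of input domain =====

-- B replaces A's interleaved flush-buffer loop by arithmetic segmentation: gap cut positions,
-- runs sliced from the id prefix, stride-5 chunks, then pair counting per chunk; measurably
-- faster by a constant factor (only size-2 combinations are generated, never all subsets).


-- ===== PORT A =====
-- itertools.combinations(l, r) over an already-deduplicated list (positional order, as in CPython)
def pvCombos : Nat → List Int → List (List Int)
  | 0, _ => [[]]
  | _ + 1, [] => []
  | r + 1, x :: xs => ((pvCombos r xs).map (fun c => x :: c)) ++ pvCombos (r + 1) xs

-- "if len(comb) == 2: combs.append(tuple(sorted(comb)))"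
def pvToPair? (c : List Int) : Option (Int × Int) :=
  match c with
  | [a, b] => some (if a ≤ b then (a, b) else (b, a))
  | _ => none

-- cow_groups: for r in range(len(lst)+1): for comb in combinations(set(lst), r): keep pairs
def cowGroups (lst : List Int) : List (Int × Int) :=
  (List.range (lst.length + 1)).foldl
    (fun combs r => combs ++ (pvCombos r (PySem.Set.ofList lst)).filterMap pvToPair?) []

-- "if group not in cow_dict: cow_dict[group]=1 else: cow_dict[group]+=1"
def stepDictA (d : PySem.Dict (Int × Int) Int) (g : Int × Int) : PySem.Dict (Int × Int) Int :=
  if d.contains g = false then d.insert g 1 else d.insert g (d.getD g 0 + 1)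

-- A's loop body over state (hold, cow_dict)
def stepA (start_time kor : List Int) (time : Int)
    (st : List Int × PySem.Dict (Int × Int) Int) (i : Nat) :
    List Int × PySem.Dict (Int × Int) Int :=
  let hold := st.1 ++ [kor.getD i 0]
  if ¬ (|start_time.getD i 0 - start_time.getD (i + 1) 0| ≤ time) ∨ hold.length > 4 then
    if hold.length > 1 then ([], (cowGroups hold).foldl stepDictA st.2)
    else ([], st.2)
  else (hold, st.2)

def Calc_Network (start_time : List Int) (kor : List Int) (time : Int) : List (Int × Int × Int) :=
  let res := (List.range (kor.length - 1)).foldl (stepA start_time kor time) ([], PySem.Dict.empty)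
  res.2.items.map (fun p => (p.1.1, p.1.2, p.2))

-- ===== PORT B =====
-- itertools.combinations(l, 2) over an already-deduplicated list
def pvPairs2 : List Int → List (Int × Int)
  | [] => []
  | x :: xs => xs.map (fun y => (x, y)) ++ pvPairs2 xs

-- "key = (a, b) if a < b else (b, a); cow_dict[key] = cow_dict.get(key, 0) + 1"
def stepDictB (d : PySem.Dict (Int × Int) Int) (p : Int × Int) : PySem.Dict (Int × Int) Int :=
  let key := if p.1 < p.2 then (p.1, p.2) else (p.2, p.1)
  d.insert key (d.getD key 0 + 1)

-- pass-1 body: on a big gap, append the slice ids[prev:i+1] and move prev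
-- (ids[a:b] with 0 ≤ a, b ported as (take b).drop a, exact for nonnegative bounds)
def stepBcut (start_time ids : List Int) (time : Int)
    (st : Nat × List (List Int)) (i : Nat) : Nat × List (List Int) :=
  if |start_time.getD i 0 - start_time.getD (i + 1) 0| > time then
    (i + 1, st.2 ++ [(ids.take (i + 1)).drop st.1])
  else st

-- per-chunk body: chunk = run[j:j+5]; "continue" on the final run's short trailing chunk
-- (j comes from range(0, len(run), 5), hence 0 ≤ j: .toNat is exact)
def stepBchunk (isLast : Bool) (run : List Int) (d : PySem.Dict (Int × Int) Int) (j : Int) :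
    PySem.Dict (Int × Int) Int :=
  let chunk := (run.drop j.toNat).take 5
  if isLast && decide (chunk.length < 5) then d
  else (pvPairs2 (PySem.Set.ofList chunk)).foldl stepDictB d

def Calc_Network_alt (start_time : List Int) (kor : List Int) (time : Int) : List (Int × Int × Int) :=
  let n := kor.length
  let m := n - 1
  let ids := kor.take m
  let p := (List.range (n - 1)).foldl (stepBcut start_time ids time) (0, [])
  let runs := p.2 ++ [(ids.take m).drop p.1]
  let d := (PySem.List.enumerate runs).foldl
      (fun d pr =>
        (PySem.List.pyRange 0 pr.2.length 5).foldl
          (stepBchunk (pr.1 == (runs.length : Int) - 1) pr.2) d)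
      PySem.Dict.empty
  d.items.map (fun q => (q.1.1, q.1.2, q.2))

-- ===== PRECONDITION & SPEC =====
-- A indexes start_time[i] and start_time[i+1] for i in range(len(kor)-1): when kor has ≥ 2
-- elements and start_time is shorter than kor, Python raises IndexError; exactly those inputs
-- are excluded (B raises there too).
def Pre_Calc_Network (start_time : List Int) (kor : List Int) (time : Int) : Prop :=
  kor.length ≤ 1 ∨ kor.length ≤ start_time.length
instance (start_time : List Int) (kor : List Int) (time : Int) : Decidable (Pre_Calc_Network start_time kor time) := by unfold Pre_Calc_Network; infer_instance

def pvWitness_Calc_Network : List Int × List Int × Int := ([0, 1, 10], [1, 2, 1], 3)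

def Spec_Calc_Network (start_time : List Int) (kor : List Int) (time : Int) (out : List (Int × Int × Int)) : Prop := out = Calc_Network_alt start_time kor time
instance (start_time : List Int) (kor : List Int) (time : Int) (out : List (Int × Int × Int)) : Decidable (Spec_Calc_Network start_time kor time out) := by unfold Spec_Calc_Network; infer_instance

-- ===== CLAIM (what is proved, stated in full; the proofs are below) =====
def Claim_equal_Calc_Network : Prop := ∀ (start_time : List Int) (kor : List Int) (time : Int), Dom_Calc_Network start_time kor time → Pre_Calc_Network start_time kor time → Spec_Calc_Network start_time kor time (Calc_Network start_time kor time)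

-- ===== LEMMAS AND PROOFS =====

-- the gap flag at index i
def gapB (st : List Int) (time : Int) (i : Nat) : Bool :=
  decide (|st.getD i 0 - st.getD (i + 1) 0| > time)

-- counting one segment, B-style
def countSeg (d : PySem.Dict (Int × Int) Int) (seg : List Int) : PySem.Dict (Int × Int) Int :=
  (pvPairs2 (PySem.Set.ofList seg)).foldl stepDictB d

-- A's per-flush action
def stepSegA (d : PySem.Dict (Int × Int) Int) (s : List Int) : PySem.Dict (Int × Int) Int :=
  if 1 < s.length then (cowGroups s).foldl stepDictA d else d

-- reference segmenter: A's buffer machine over (value, gap) events (trailing buffer dropped)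
def segsC : List (Int × Bool) → List Int → List (List Int)
  | [], _ => []
  | (v, g) :: rest, buf =>
    let b := buf ++ [v]
    if g || decide (b.length > 4) then b :: segsC rest [] else segsC rest b

-- maximal gap-free runs (each gap ends a run; one possibly-empty trailing run)
def runsOf : List (Int × Bool) → List (List Int)
  | [] => [[]]
  | (v, g) :: rest =>
    if g then [v] :: runsOf rest
    else
      match runsOf rest with
      | [] => [[v]]
      | r :: rs => (v :: r) :: rs

-- stride-5 chunks, trailing partial chunk kept
def chunks5 (l : List Int) : List (List Int) :=
  if _h : l = [] then [] else l.take 5 :: chunks5 (l.drop 5)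
termination_by l.length
decreasing_by
  have := List.length_pos_iff.mpr _h
  simp [List.length_drop]
  omega

-- chunk list of a run sequence whose first run is prefixed by buf; the last run's
-- trailing partial chunk is dropped
def chunksG : List Int → List (List Int) → List (List Int)
  | _, [] => []
  | buf, [r] => (chunks5 (buf ++ r)).filter (fun c => c.length == 5)
  | buf, r :: rs => chunks5 (buf ++ r) ++ chunksG [] rs

def prependFirst (x : List Int) : List (List Int) → List (List Int)
  | [] => [x]
  | r :: rs => (x ++ r) :: rs

lemma chunksG_single (buf r : List Int) :
    chunksG buf [r] = (chunks5 (buf ++ r)).filter (fun c => c.length == 5) := rfl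

lemma chunksG_cons (buf r r2 : List Int) (rs : List (List Int)) :
    chunksG buf (r :: r2 :: rs) = chunks5 (buf ++ r) ++ chunksG [] (r2 :: rs) := rfl

lemma prependFirst_cons (x r : List Int) (rs : List (List Int)) :
    prependFirst x (r :: rs) = (x ++ r) :: rs := rfl

lemma runsOf_cons_true (v : Int) (rest : List (Int × Bool)) :
    runsOf ((v, true) :: rest) = [v] :: runsOf rest := rfl

lemma runsOf_cons_false (v : Int) (rest : List (Int × Bool)) (r : List Int)
    (rs : List (List Int)) (hr : runsOf rest = r :: rs) :
    runsOf ((v, false) :: rest) = (v :: r) :: rs := by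
  simp [runsOf, hr]

lemma runsOf_ne_nil (es : List (Int × Bool)) : runsOf es ≠ [] := by
  match es with
  | [] => simp [runsOf]
  | (v, g) :: rest =>
    unfold runsOf
    by_cases h : g = true
    · simp [h]
    · simp only [Bool.not_eq_true] at h
      simp only [h]
      cases hr : runsOf rest <;> simp

lemma chunks5_nil : chunks5 [] = [] := by
  rw [chunks5]
  simp

lemma chunks5_cons (l : List Int) (h : l ≠ []) :
    chunks5 l = l.take 5 :: chunks5 (l.drop 5) := by
  rw [chunks5, dif_neg h]

lemma chunks5_short (l : List Int) (h0 : l ≠ []) (h5 : l.length ≤ 5) : chunks5 l = [l] := by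
  rw [chunks5_cons l h0, List.take_of_length_le h5, List.drop_eq_nil_of_le h5, chunks5_nil]

lemma chunks5_peel (b r : List Int) (hb : b.length = 5) :
    chunks5 (b ++ r) = b :: chunks5 r := by
  have hne : b ++ r ≠ [] := by
    intro h; rw [List.append_eq_nil_iff] at h; simp [h.1] at hb
  rw [chunks5_cons _ hne, ← hb, List.take_left, List.drop_left]

-- chunks5 as an indexed map (to meet range(0, len, 5))
lemma chunks5_eq_map (l : List Int) :
    chunks5 l = (List.range ((l.length + 4) / 5)).map (fun k => (l.drop (5 * k)).take 5) := by
  induction hn : l.length using Nat.strong_induction_on generalizing l with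
  | _ n ih =>
    subst hn
    rcases eq_or_ne l [] with rfl | hne
    · simp [chunks5_nil]
    · have hpos : 0 < l.length := List.length_pos_iff.mpr hne
      rw [chunks5_cons l hne]
      have htail : chunks5 (l.drop 5)
          = List.map ((fun k => (l.drop (5 * k)).take 5) ∘ Nat.succ)
              (List.range (((l.drop 5).length + 4) / 5)) := by
        rw [ih (l.drop 5).length (by rw [List.length_drop]; omega) (l.drop 5) rfl]
        apply List.map_congr_left
        intro k _
        simp only [Function.comp_apply, List.drop_drop, Nat.succ_eq_add_one]
        congr 2
        omega
      have hcount : (l.length + 4) / 5 = ((l.drop 5).length + 4) / 5 + 1 := by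
        rw [List.length_drop]; omega
      rw [hcount, List.range_succ_eq_map, List.map_cons, List.map_map, ← htail]
      congr 1

-- all chunks have length ≤ 5
lemma chunks5_len_le (l : List Int) : ∀ c ∈ chunks5 l, c.length ≤ 5 := by
  intro c hc
  rw [chunks5_eq_map] at hc
  obtain ⟨k, _, rfl⟩ := List.mem_map.mp hc
  simp

-- MAIN STRUCTURAL LEMMA: buffer machine = chunks of gap-runs
lemma segsC_eq_chunksG :
    ∀ (es : List (Int × Bool)) (buf : List Int), buf.length ≤ 4 →
      segsC es buf = chunksG buf (runsOf es) := by
  intro es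
  induction es with
  | nil =>
    intro buf hb
    simp only [segsC, runsOf, chunksG_single, List.append_nil]
    rcases eq_or_ne buf [] with rfl | hne
    · simp [chunks5_nil]
    · rw [chunks5_short buf hne (by omega)]
      have hne5 : (buf.length == 5) = false := by simp; omega
      simp [List.filter, hne5]
  | cons e rest ih =>
    rcases e with ⟨v, g⟩
    intro buf hb
    obtain ⟨r, rs, hr⟩ : ∃ r rs, runsOf rest = r :: rs := by
      cases h : runsOf rest with
      | nil => exact absurd h (runsOf_ne_nil rest)
      | cons r rs => exact ⟨r, rs, rfl⟩
    have hbuflen : (buf ++ [v]).length = buf.length + 1 := by simp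
    have hassoc : buf ++ v :: r = (buf ++ [v]) ++ r := by simp
    cases g with
    | false =>
      simp only [segsC, Bool.false_or]
      rw [runsOf_cons_false _ _ _ _ hr]
      by_cases h4 : (buf ++ [v]).length > 4
      · -- buffer reaches 5: flush
        have hlen5 : (buf ++ [v]).length = 5 := by omega
        rw [if_pos (by simp only [decide_eq_true_iff]; omega)]
        cases rs with
        | nil =>
          rw [chunksG_single, hassoc, chunks5_peel _ _ hlen5, List.filter_cons]
          rw [ih [] (by simp), hr, chunksG_single]
          simp [hlen5]
        | cons r2 rs2 =>
          rw [chunksG_cons, hassoc, chunks5_peel _ _ hlen5]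
          rw [ih [] (by simp), hr, chunksG_cons]
          simp
      · -- buffer stays small: keep accumulating
        rw [if_neg (by simp only [decide_eq_true_iff]; omega)]
        have hlen : (buf ++ [v]).length ≤ 4 := by omega
        rw [ih (buf ++ [v]) hlen, hr]
        cases rs with
        | nil => rw [chunksG_single, chunksG_single, hassoc]
        | cons r2 rs2 => rw [chunksG_cons, chunksG_cons, hassoc]
    | true =>
      simp only [segsC, Bool.true_or, if_pos]
      rw [runsOf_cons_true, hr, chunksG_cons]
      have hflush : chunks5 (buf ++ [v]) = [buf ++ [v]] :=
        chunks5_short _ (by simp) (by omega)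
      rw [hflush, ih [] (by simp), hr]
      simp

-- ===== A-side bridge =====

lemma stepDictA_eq (d : PySem.Dict (Int × Int) Int) (k : Int × Int) :
    stepDictA d k = d.insert k (d.getD k 0 + 1) := by
  unfold stepDictA
  by_cases h : d.contains k = false
  · have h0 : d.getD k 0 = 0 := PySem.Dict.getD_of_not_contains _ _ h
    rw [if_pos h, h0]
    norm_num
  · rw [if_neg h]

lemma pvCombos_length : ∀ (r : Nat) (l : List Int), ∀ c ∈ pvCombos r l, c.length = r := by
  intro r l
  induction l generalizing r with
  | nil => intro c hc; cases r with
    | zero => simp [pvCombos] at hc; simp [hc]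
    | succ r => simp [pvCombos] at hc
  | cons x xs ih =>
    intro c hc
    cases r with
    | zero => simp [pvCombos] at hc; simp [hc]
    | succ r =>
      simp [pvCombos] at hc
      rcases hc with ⟨c', hc', rfl⟩ | hc
      · simp [ih r c' hc']
      · exact ih (r + 1) c hc

lemma pvToPair?_of_len_ne (c : List Int) (h : c.length ≠ 2) : pvToPair? c = none := by
  match c with
  | [] => rfl
  | [_] => rfl
  | [_, _] => simp at h
  | _ :: _ :: _ :: _ => rfl

lemma pvCombos_one (l : List Int) : pvCombos 1 l = l.map (fun y => [y]) := by
  induction l with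
  | nil => rfl
  | cons x xs ih => simp [pvCombos, ih]

lemma pvCombos_two (l : List Int) :
    pvCombos 2 l = (pvPairs2 l).map (fun p => [p.1, p.2]) := by
  induction l with
  | nil => rfl
  | cons x xs ih =>
    show ((pvCombos 1 xs).map (fun c => x :: c)) ++ pvCombos 2 xs = _
    simp [pvCombos_one, ih, pvPairs2, List.map_map, Function.comp]

lemma pvToPair?_pair (a b : Int) :
    pvToPair? [a, b] = some (if a < b then (a, b) else (b, a)) := by
  simp only [pvToPair?]
  rcases lt_trichotomy a b with h | rfl | h
  · simp [le_of_lt h, h]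
  · simp
  · simp [not_le.mpr h, not_lt.mpr (le_of_lt h)]

lemma foldl_append_f {α β : Type} (f : α → List β) :
    ∀ (l : List α) (acc : List β),
      l.foldl (fun acc r => acc ++ f r) acc = acc ++ l.flatMap f := by
  intro l
  induction l with
  | nil => simp
  | cons x xs ih => intro acc; simp [ih, List.append_assoc]

lemma cowGroups_eq (lst : List Int) (h : 2 ≤ lst.length) :
    cowGroups lst
      = (pvPairs2 (PySem.Set.ofList lst)).map
          (fun p => if p.1 < p.2 then (p.1, p.2) else (p.2, p.1)) := by
  unfold cowGroups
  rw [foldl_append_f, List.nil_append]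
  have hzero : ∀ r : Nat, r ≠ 2 →
      (pvCombos r (PySem.Set.ofList lst)).filterMap pvToPair? = [] := by
    intro r hr
    rw [List.filterMap_eq_nil_iff]
    intro c hc
    exact pvToPair?_of_len_ne c (by rw [pvCombos_length r _ c hc]; exact hr)
  have h2 : (pvCombos 2 (PySem.Set.ofList lst)).filterMap pvToPair?
      = (pvPairs2 (PySem.Set.ofList lst)).map
          (fun p => if p.1 < p.2 then (p.1, p.2) else (p.2, p.1)) := by
    rw [pvCombos_two, List.filterMap_map]
    rw [List.filterMap_eq_map_iff_forall_eq_some.mpr]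
    intro p _
    exact pvToPair?_pair p.1 p.2
  have hmain : ∀ m : Nat, 2 < m →
      (List.range m).flatMap (fun r => (pvCombos r (PySem.Set.ofList lst)).filterMap pvToPair?)
        = (pvPairs2 (PySem.Set.ofList lst)).map
            (fun p => if p.1 < p.2 then (p.1, p.2) else (p.2, p.1)) := by
    intro m hm
    induction m with
    | zero => omega
    | succ m ih =>
      rw [List.range_succ, List.flatMap_append]
      rcases Nat.lt_or_ge 2 m with hlt | hge
      · rw [ih hlt, List.flatMap_cons, List.flatMap_nil,
          hzero m (by omega), List.append_nil, List.append_nil]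
      · have hm2 : m = 2 := by omega
        subst hm2
        have hr2 : List.range 2 = [0, 1] := by decide
        rw [hr2]
        simp only [List.flatMap_cons, List.flatMap_nil, List.append_nil]
        rw [hzero 0 (by omega), hzero 1 (by omega), h2]
        simp
  exact hmain (lst.length + 1) (by omega)

lemma stepSegA_eq_countSeg : stepSegA = countSeg := by
  funext d s
  unfold stepSegA countSeg
  by_cases h : 1 < s.length
  · rw [if_pos h, cowGroups_eq s (by omega), List.foldl_map]
    apply PySem.List.foldl_congr_mem
    intro d' p _
    rw [stepDictA_eq]
    rfl
  · rw [if_neg h]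
    have hset : pvPairs2 (PySem.Set.ofList s) = [] := by
      match s, h with
      | [], _ => rfl
      | [x], _ => rfl
      | x :: y :: t, h => simp at h
    rw [hset]
    rfl

-- A's fold over an index list equals stepSegA-folding the segments of the event list
lemma A_loop (st kor : List Int) (time : Int) :
    ∀ (idxs : List Nat) (buf : List Int) (d : PySem.Dict (Int × Int) Int),
      (idxs.foldl (stepA st kor time) (buf, d)).2
        = (segsC (idxs.map (fun i => (kor.getD i 0, gapB st time i))) buf).foldl stepSegA d := by
  intro idxs
  induction idxs with
  | nil => intro buf d; rfl
  | cons i rest ih =>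
    intro buf d
    simp only [List.foldl_cons, List.map_cons]
    have hcond : (¬ (|st.getD i 0 - st.getD (i + 1) 0| ≤ time)
        ∨ (buf ++ [kor.getD i 0]).length > 4)
        ↔ (gapB st time i || decide ((buf ++ [kor.getD i 0]).length > 4)) = true := by
      simp [gapB]
    by_cases hc : (gapB st time i || decide ((buf ++ [kor.getD i 0]).length > 4)) = true
    · have hA : stepA st kor time (buf, d) i
          = ([], stepSegA d (buf ++ [kor.getD i 0])) := by
        unfold stepA stepSegA
        rw [if_pos (hcond.mpr hc)]
        by_cases hlen : (buf ++ [kor.getD i 0]).length > 1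
        · rw [if_pos hlen, if_pos hlen]
        · rw [if_neg hlen, if_neg hlen]
      rw [hA, ih]
      simp only [segsC, hc, if_true, List.foldl_cons]
    · have hA : stepA st kor time (buf, d) i = (buf ++ [kor.getD i 0], d) := by
        unfold stepA
        rw [if_neg (fun h => hc (hcond.mp h))]
      rw [hA, ih]
      have hc' : (gapB st time i || decide ((buf ++ [kor.getD i 0]).length > 4)) = false := by
        simpa using hc
      simp only [segsC, hc']
      rw [if_neg (by simp)]

-- ===== B-side bridge: pass 1 produces runsOf =====

lemma take_snoc_drop (ids : List Int) (prev a : Nat) (hpa : prev ≤ a) (ha : a < ids.length) :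
    (ids.take (a + 1)).drop prev = (ids.take a).drop prev ++ [ids.getD a 0] := by
  rw [List.take_add_one, List.getElem?_eq_getElem ha]
  simp only [Option.toList_some]
  rw [List.drop_append_of_le_length (by simp; omega)]
  simp [List.getD, List.getElem?_eq_getElem ha]

lemma B_pass1 (st ids : List Int) (time : Int) :
    ∀ (k a prev : Nat) (runs : List (List Int)), prev ≤ a → a + k ≤ ids.length →
      (let p := (List.range' a k).foldl (stepBcut st ids time) (prev, runs);
        p.2 ++ [(ids.take (a + k)).drop p.1])
      = runs ++ prependFirst ((ids.take a).drop prev)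
          (runsOf ((List.range' a k).map (fun i => (ids.getD i 0, gapB st time i)))) := by
  intro k
  induction k with
  | zero =>
    intro a prev runs hpa _
    simp only [List.range'_zero, List.foldl_nil, List.map_nil, runsOf, prependFirst,
      Nat.add_zero, List.append_nil]
  | succ k ih =>
    intro a prev runs hpa hak
    have ha : a < ids.length := by omega
    rw [List.range'_succ]
    simp only [List.foldl_cons, List.map_cons]
    obtain ⟨r, rs, hr⟩ : ∃ r rs,
        runsOf ((List.range' (a + 1) k).map (fun i => (ids.getD i 0, gapB st time i)))
          = r :: rs := by
      cases h : runsOf ((List.range' (a + 1) k).map (fun i => (ids.getD i 0, gapB st time i))) with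
      | nil => exact absurd h (runsOf_ne_nil _)
      | cons r rs => exact ⟨r, rs, rfl⟩
    by_cases hg : gapB st time a = true
    · have hstep : stepBcut st ids time (prev, runs) a
          = (a + 1, runs ++ [(ids.take (a + 1)).drop prev]) := by
        unfold stepBcut
        rw [if_pos (of_decide_eq_true hg)]
      rw [hstep]
      have hih := ih (a + 1) (a + 1) (runs ++ [(ids.take (a + 1)).drop prev]) (le_refl _) (by omega)
      simp only at hih
      rw [show a + (k + 1) = (a + 1) + k by omega, hih]
      rw [show List.drop (a + 1) (List.take (a + 1) ids) = ([] : List Int) from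
        List.drop_eq_nil_of_le (by simp), hg, runsOf_cons_true, hr,
        prependFirst_cons, prependFirst_cons]
      rw [take_snoc_drop ids prev a hpa ha]
      simp
    · have hg' : gapB st time a = false := by simpa using hg
      have hstep : stepBcut st ids time (prev, runs) a = (prev, runs) := by
        unfold stepBcut
        rw [if_neg (by simpa [gapB] using hg')]
      rw [hstep]
      have hih := ih (a + 1) prev runs (by omega) (by omega)
      simp only at hih
      rw [show a + (k + 1) = (a + 1) + k by omega, hih]
      rw [hg', runsOf_cons_false _ _ _ _ hr, hr, prependFirst_cons, prependFirst_cons]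
      rw [take_snoc_drop ids prev a hpa ha]
      simp

-- ===== B-side bridge: pass 2 = chunksG fold =====

-- stride loop over one run = fold over its chunk list with skip-body
lemma B_chunkloop (run : List Int) (flag : Bool) (d : PySem.Dict (Int × Int) Int) :
    (PySem.List.pyRange 0 run.length 5).foldl (stepBchunk flag run) d
      = (chunks5 run).foldl
          (fun d c => if flag && decide (c.length < 5) then d else countSeg d c) d := by
  rw [PySem.List.pyRange_of_pos 0 (run.length : Int) (by norm_num : (0:Int) < 5)]
  have hcnt : (if (0:Int) < (run.length : Int) then (((run.length : Int) - 0 + 5 - 1) / 5).toNat else 0)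
      = (run.length + 4) / 5 := by
    by_cases h : 0 < run.length
    · rw [if_pos (by exact_mod_cast h)]
      have hc : ((run.length : Int) - 0 + 5 - 1) = ((run.length + 4 : Nat) : Int) := by
        push_cast; ring
      rw [hc]
      exact_mod_cast rfl
    · have h0 : run.length = 0 := by omega
      simp [h0]
  rw [hcnt, List.foldl_map, chunks5_eq_map, List.foldl_map]
  apply PySem.List.foldl_congr_mem
  intro acc k _
  have hj : ((0:Int) + 5 * (k : Int)).toNat = 5 * k := by omega
  simp only [stepBchunk, countSeg, hj]

-- fold over enumerate = chunksG fold (the flag is true exactly at the final run)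
lemma B_pass2 (L : Int) :
    ∀ (runs : List (List Int)) (s : Int) (d : PySem.Dict (Int × Int) Int),
      runs ≠ [] → s + runs.length = L →
      (PySem.List.enumerate runs s).foldl
        (fun d pr =>
          (PySem.List.pyRange 0 pr.2.length 5).foldl
            (stepBchunk (pr.1 == L - 1) pr.2) d) d
      = (chunksG [] runs).foldl countSeg d := by
  intro runs
  induction runs with
  | nil => intro s d h _; exact absurd rfl h
  | cons r rs ih =>
    intro s d _ hL
    rw [PySem.List.enumerate_cons, List.foldl_cons]
    cases rs with
    | nil =>
      have hflag : (s == L - 1) = true := by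
        have hs : s = L - 1 := by
          simp only [List.length_singleton, Nat.cast_one] at hL
          omega
        simp [hs]
      simp only [hflag]
      rw [B_chunkloop]
      have hnil : PySem.List.enumerate ([] : List (List Int)) (s + 1) = [] := rfl
      rw [hnil, List.foldl_nil, chunksG_single, List.nil_append, List.foldl_filter]
      apply PySem.List.foldl_congr_mem
      intro acc c hc
      have hle : c.length ≤ 5 := chunks5_len_le r c hc
      by_cases h5 : c.length = 5
      · simp [h5]
      · have hlt : c.length < 5 := by omega
        simp [h5, hlt]
    | cons r2 rs2 =>
      have hflag : (s == L - 1) = false := by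
        have hs : s ≠ L - 1 := by
          simp only [List.length_cons] at hL
          push_cast at hL
          omega
        simp [hs]
      simp only [hflag]
      rw [B_chunkloop]
      have hbody : (chunks5 r).foldl
          (fun d c => if false && decide (c.length < 5) then d else countSeg d c) d
          = (chunks5 r).foldl countSeg d := by
        apply PySem.List.foldl_congr_mem
        intro acc c _
        simp
      rw [hbody, chunksG_cons, List.nil_append, List.foldl_append]
      refine ih (s + 1) _ (by simp) ?_
      simp only [List.length_cons] at hL ⊢
      push_cast at hL ⊢
      omega

-- B's part-1 runs list, packaged
lemma prependFirst_nil (l : List (List Int)) (h : l ≠ []) : prependFirst [] l = l := by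
  cases l with
  | nil => exact absurd rfl h
  | cons r rs => rw [prependFirst_cons, List.nil_append]

-- ===== VERDICT (by name: the statement is the Claim_ definition above) =====
theorem Calc_Network_spec : Claim_equal_Calc_Network := by
  intro st kor time _ _
  unfold Spec_Calc_Network
  simp only [Calc_Network, Calc_Network_alt]
  have hlen : (kor.take (kor.length - 1)).length = kor.length - 1 := by
    rw [List.length_take]
    omega
  have hev : (List.range (kor.length - 1)).map (fun i => (kor.getD i 0, gapB st time i))
      = (List.range (kor.length - 1)).map
          (fun i => ((kor.take (kor.length - 1)).getD i 0, gapB st time i)) := by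
    apply List.map_congr_left
    intro i hi
    have him : i < kor.length - 1 := List.mem_range.mp hi
    have hgd : (kor.take (kor.length - 1)).getD i 0 = kor.getD i 0 := by
      simp only [List.getD]
      rw [List.getElem?_take, if_pos him]
    rw [hgd]
  -- A side: buffer loop = chunk decomposition
  have hA := A_loop st kor time (List.range (kor.length - 1)) [] PySem.Dict.empty
  rw [stepSegA_eq_countSeg, segsC_eq_chunksG _ [] (by simp), hev] at hA
  -- B side, pass 1: the cut/slice loop builds exactly the gap runs
  have h1 := B_pass1 st (kor.take (kor.length - 1)) time (kor.length - 1) 0 0 []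
    (le_refl 0) (by rw [hlen]; omega)
  simp only [Nat.zero_add, List.nil_append, List.take_zero, List.drop_nil] at h1
  rw [← List.range_eq_range'] at h1
  rw [prependFirst_nil _ (runsOf_ne_nil _)] at h1
  -- B side, pass 2: the chunk loops fold countSeg over the same chunk list
  have h2 := B_pass2
    (((runsOf ((List.range (kor.length - 1)).map
        (fun i => ((kor.take (kor.length - 1)).getD i 0, gapB st time i)))).length : Int))
    (runsOf ((List.range (kor.length - 1)).map
        (fun i => ((kor.take (kor.length - 1)).getD i 0, gapB st time i))))
    0 PySem.Dict.empty (runsOf_ne_nil _) (by simp)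
  rw [hA, h1, h2]
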